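-- pv_equiv track=rewrite | github.com/zhangshiyunwlq/WLQ_LJC | wlq_rl_layout/rl_data_proc.py | replace_with_room_sequence
-- ===== SOURCE A (Python) =====
-- def replace_with_room_sequence(buildings, room_widths, grouped_idx, goal_idx):
--     """
--     将建筑范围替换为房间宽度序列
--     :param buildings: 建筑范围列表
--     :param room_widths: 房间宽度列表
--     :return: 替换后的列表
--     """
--     result = [[] for _ in buildings]
--
--     # 遍历每个子列表
--     for i, building_group in enumerate(buildings):
--         # 遍历每个建筑范围
--         for building_range in building_group:
--             start, end = building_range
--             room_sequence = []
--             current_pos = 0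
--             width_sum = 0
--
--             # 从位置0开始累加房间宽度
--             for width in room_widths:
--                 if start <= current_pos < end:  # 如果当前位置在范围内
--                     room_sequence.append(width)
--                 current_pos += width
--
--                 if current_pos >= end:  # 如果超出范围就停止
--                     break
--
--             result[i].append(room_sequence)
--
--     # 创建一个字典，将 grouped_idx 与 result 关联
--     group_to_result = {tuple(group): res for group, res in zip(grouped_idx, result)}
--
--     # 初始化一个空列表来存放重新排序的结果
--     ordered_result = []
--
--     # 遍历 goal_idx，根据分组找到对应的值，并添加到结果列表中
--     for idx in goal_idx:
--         for group in grouped_idx: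
--             if idx in group:
--                 group_index = group.index(idx)
--                 ordered_result.append(group_to_result[tuple(group)][group_index])
--                 break
--     return ordered_result
-- ===== SOURCE B (Python) =====
-- def replace_with_room_sequence(buildings, room_widths, grouped_idx, goal_idx):
--     # Goal-driven: instead of building the full table of room sequences for every
--     # building and reordering it afterwards, resolve each goal index to its building
--     # range via two one-pass indexes and compute only the sequences the goals ask
--     # for, memoized per range.
--     range_row = {tuple(g): bld for g, bld in zip(grouped_idx, buildings)}
--
--     slot = {}  # goal index -> (first group containing it, offset inside that group)
--     for g in grouped_idx:
--         t = tuple(g)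
--         for i, v in enumerate(g):
--             slot.setdefault(v, (t, i))
--
--     pos = [0]  # prefix positions of the rooms, computed once
--     for w in room_widths:
--         pos.append(pos[-1] + w)
--
--     cache = {}
--
--     def seq(start, end):
--         if (start, end) not in cache:
--             stop = next((k + 1 for k, p in enumerate(pos[1:]) if p >= end),
--                         len(room_widths))
--             cache[(start, end)] = [w for p, w in zip(pos, room_widths[:stop])
--                                    if start <= p < end]
--         return cache[(start, end)]
--
--     out = []
--     for idx in goal_idx:
--         if idx in slot:
--             t, i = slot[idx]
--             start, end = range_row[t][i]
--             out.append(seq(start, end))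
--     return out
-- ===== Notes on version B (the rewrite author's own statement) =====
-- stated objective: faster
-- what changed: B is goal-driven: it builds two one-pass indexes (goal index -> (group, offset); group -> building row, last-duplicate-wins like dict(zip)) plus the room prefix positions once, then computes only the room sequences the goal indices actually request, memoized per range, whereas A builds the full table of sequences for every building range and rescans grouped_idx (with list.index) for every goal.
import Mathlib
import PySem

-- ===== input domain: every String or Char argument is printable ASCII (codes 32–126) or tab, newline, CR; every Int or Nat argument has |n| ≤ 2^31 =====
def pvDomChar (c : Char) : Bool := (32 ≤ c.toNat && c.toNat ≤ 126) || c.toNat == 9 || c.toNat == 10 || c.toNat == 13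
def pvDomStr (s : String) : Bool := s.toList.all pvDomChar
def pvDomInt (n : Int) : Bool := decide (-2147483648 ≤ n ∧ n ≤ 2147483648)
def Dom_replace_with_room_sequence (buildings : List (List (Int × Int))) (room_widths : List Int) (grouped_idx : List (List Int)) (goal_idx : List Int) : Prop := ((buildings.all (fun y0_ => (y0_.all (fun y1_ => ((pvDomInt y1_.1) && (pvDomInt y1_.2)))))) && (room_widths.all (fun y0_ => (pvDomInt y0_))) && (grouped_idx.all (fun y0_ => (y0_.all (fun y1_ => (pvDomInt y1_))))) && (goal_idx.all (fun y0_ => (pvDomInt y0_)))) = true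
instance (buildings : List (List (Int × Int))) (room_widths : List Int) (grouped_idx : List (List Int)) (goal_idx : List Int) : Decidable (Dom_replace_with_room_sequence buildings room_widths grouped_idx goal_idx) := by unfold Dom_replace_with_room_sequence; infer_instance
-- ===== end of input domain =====

-- B is goal-driven: it resolves each goal index to its building range via two one-pass
-- indexes and computes only the sequences the goals ask for (memoized per range), instead
-- of A's full table of sequences plus a per-goal rescan of grouped_idx (objective: faster,
-- measured).

-- ===== PORT A =====

-- A's inner loop over room_widths: append width while start ≤ pos < end, break once pos ≥ end.
def pvA_roomSeq (s e : Int) : List Int → Int → List Int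
  | [], _ => []
  | w :: ws, pos =>
    let cur := if s ≤ pos ∧ pos < e then [w] else []
    if pos + w ≥ e then cur else cur ++ pvA_roomSeq s e ws (pos + w)

-- A's reorder scan: first group containing idx; `group.index` = PySem.List.index?;
-- the dict lookup / row indexing raise in Python where the key/index is missing — those
-- inputs are excluded by Pre_; the port uses getD defaults there.
def pvA_lookup (d : PySem.Dict (List Int) (List (List Int))) (idx : Int) :
    List (List Int) → Option (List Int)
  | [] => none
  | g :: gs =>
    if g.contains idx then
      some ((d.getD g []).getD ((PySem.List.index? g idx).getD 0) [])
    else pvA_lookup d idx gs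

def replace_with_room_sequence (buildings : List (List (Int × Int))) (room_widths : List Int) (grouped_idx : List (List Int)) (goal_idx : List Int) : List (List Int) :=
  let result := buildings.map (fun bg => bg.map (fun r => pvA_roomSeq r.1 r.2 room_widths 0))
  -- dict comprehension over zip(grouped_idx, result): a fold inserting each pair
  let d := (grouped_idx.zip result).foldl (fun d p => d.insert p.1 p.2) PySem.Dict.empty
  goal_idx.foldl (fun acc idx =>
    match pvA_lookup d idx grouped_idx with
    | some v => acc ++ [v]
    | none => acc) []

-- ===== PORT B =====

-- pos = [0]; for w in room_widths: pos.append(pos[-1] + w)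
def pvB_prefix : List Int → Int → List Int
  | [], p => [p]
  | w :: ws, p => p :: pvB_prefix ws (p + w)

-- stop = next((k+1 for k, p in enumerate(pos[1:]) if p >= end), len(room_widths))
def pvB_stop (e : Int) (pref : List Int) (n : Nat) : Nat :=
  match pref.tail.findIdx? (fun p => decide (e ≤ p)) with
  | some m => m + 1
  | none => n

-- [w for p, w in zip(pos, room_widths[:stop]) if start <= p < end]
def pvB_seq (s e : Int) (pref widths : List Int) : List Int :=
  ((pref.zip (widths.take (pvB_stop e pref widths.length))).filter
      (fun p => decide (s ≤ p.1) && decide (p.1 < e))).map (·.2)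

-- slot dict build: for g in grouped_idx: for i, v in enumerate(g): slot.setdefault(v, (g, i))
def pvB_slotG (key : List Int) : List Int → Nat → PySem.Dict Int (List Int × Nat) → PySem.Dict Int (List Int × Nat)
  | [], _, d => d
  | x :: xs, i, d => pvB_slotG key xs (i + 1) (if (d.get? x).isSome then d else d.insert x (key, i))

def pvB_slotAll : List (List Int) → PySem.Dict Int (List Int × Nat) → PySem.Dict Int (List Int × Nat)
  | [], d => d
  | g :: gs, d => pvB_slotAll gs (pvB_slotG g g 0 d)

-- range_row[t][i] raises in Python where the key/index is missing (exactly where A raises);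
-- those inputs are excluded by Pre_ and the port uses getD defaults there.
-- seq with its memo cache: returns the (possibly updated) cache and the sequence
def pvB_seqMemo (s e : Int) (pref widths : List Int) (cache : PySem.Dict (Int × Int) (List Int)) :
    PySem.Dict (Int × Int) (List Int) × List Int :=
  match cache.get? (s, e) with
  | some v => (cache, v)
  | none =>
    let v := pvB_seq s e pref widths
    (cache.insert (s, e) v, v)

def replace_with_room_sequence_alt (buildings : List (List (Int × Int))) (room_widths : List Int) (grouped_idx : List (List Int)) (goal_idx : List Int) : List (List Int) :=
  let range_row := (grouped_idx.zip buildings).foldl (fun d p => d.insert p.1 p.2) PySem.Dict.empty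
  let slot := pvB_slotAll grouped_idx PySem.Dict.empty
  let pref := pvB_prefix room_widths 0
  (goal_idx.foldl (fun st idx =>
    match slot.get? idx with
    | some (t, i) =>
      let r := (range_row.getD t []).getD i (0, 0)
      let (cache, v) := pvB_seqMemo r.1 r.2 pref room_widths st.1
      (cache, st.2 ++ [v])
    | none => st) ((PySem.Dict.empty : PySem.Dict (Int × Int) (List Int)), [])).2

-- ===== PRECONDITION & SPEC =====

-- first group containing idx (the group itself, and the index of idx inside it)
def pvFirstHit : List (List Int) → Int → Option (List Int × Nat)
  | [], _ => none
  | g :: gs, idx =>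
    if g.contains idx then some (g, (PySem.List.index? g idx).getD 0)
    else pvFirstHit gs idx

-- value paired with the LAST occurrence of a key (Python's dict over zip keeps the last duplicate)
def pvLastVal {V : Type} : List (List Int × V) → List Int → Option V
  | [], _ => none
  | (k, v) :: t, x => (pvLastVal t x).or (if k == x then some v else none)

-- Pre_ excludes exactly the inputs on which A RAISES: a looked-up goal index whose first
-- containing group is not a key of A's zip-truncated dict (KeyError) or whose index inside the
-- group exceeds the row the dict returns for that key (IndexError).
def Pre_replace_with_room_sequence (buildings : List (List (Int × Int))) (room_widths : List Int) (grouped_idx : List (List Int)) (goal_idx : List Int) : Prop :=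
  ∀ idx ∈ goal_idx,
    (match pvFirstHit grouped_idx idx with
     | none => true
     | some (key, i) =>
       match pvLastVal (grouped_idx.zip buildings) key with
       | none => false
       | some row => decide (i < row.length)) = true

instance (buildings : List (List (Int × Int))) (room_widths : List Int) (grouped_idx : List (List Int)) (goal_idx : List Int) : Decidable (Pre_replace_with_room_sequence buildings room_widths grouped_idx goal_idx) := by unfold Pre_replace_with_room_sequence; infer_instance

def pvWitness_replace_with_room_sequence : (List (List (Int × Int))) × List Int × List (List Int) × List Int :=
  ([[(0, 1)], [(1, 3), (0, 2)]], [1, 2], [[1], [2, 3]], [3, 1])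

def Spec_replace_with_room_sequence (buildings : List (List (Int × Int))) (room_widths : List Int) (grouped_idx : List (List Int)) (goal_idx : List Int) (out : List (List Int)) : Prop := out = replace_with_room_sequence_alt buildings room_widths grouped_idx goal_idx
instance (buildings : List (List (Int × Int))) (room_widths : List Int) (grouped_idx : List (List Int)) (goal_idx : List Int) (out : List (List Int)) : Decidable (Spec_replace_with_room_sequence buildings room_widths grouped_idx goal_idx out) := by unfold Spec_replace_with_room_sequence; infer_instance

-- ===== CLAIM (what is proved, stated in full; the proofs are below) =====
def Claim_equal_replace_with_room_sequence : Prop := ∀ (buildings : List (List (Int × Int))) (room_widths : List Int) (grouped_idx : List (List Int)) (goal_idx : List Int), Dom_replace_with_room_sequence buildings room_widths grouped_idx goal_idx → Pre_replace_with_room_sequence buildings room_widths grouped_idx goal_idx → Spec_replace_with_room_sequence buildings room_widths grouped_idx goal_idx (replace_with_room_sequence buildings room_widths grouped_idx goal_idx)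

-- ===== LEMMAS AND PROOFS =====

-- B's stop recurses like A's scan
theorem pvB_stop_cons (e w : Int) (ws : List Int) (p : Int) :
    pvB_stop e (pvB_prefix (w :: ws) p) (ws.length + 1) =
      (if e ≤ p + w then 1 else pvB_stop e (pvB_prefix ws (p + w)) ws.length + 1) := by
  cases ws with
  | nil => simp [pvB_prefix, pvB_stop, List.findIdx?_cons]; split_ifs <;> rfl
  | cons w' ws' =>
    simp only [pvB_prefix, pvB_stop, List.tail_cons, List.findIdx?_cons, List.length_cons]
    by_cases h : e ≤ p + w
    · simp [h]
    · simp only [h, decide_false, if_false, decide_true, if_pos, decide_eq_true_eq]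
      cases hf : (pvB_prefix ws' (p + w + w')).findIdx? (fun q => decide (e ≤ q)) <;>
        simp [h, hf]

-- the room-sequence computations agree
theorem pvSeq_eq (s e : Int) (ws : List Int) (p : Int) :
    pvB_seq s e (pvB_prefix ws p) ws = pvA_roomSeq s e ws p := by
  induction ws generalizing p with
  | nil => simp [pvB_seq, pvB_stop, pvB_prefix, pvA_roomSeq]
  | cons w ws ih =>
    have hc := pvB_stop_cons e w ws p
    simp only [pvB_prefix, List.length_cons] at hc
    simp only [pvB_prefix, pvB_seq, List.length_cons, hc, pvA_roomSeq, ge_iff_le]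
    by_cases h : e ≤ p + w
    · simp only [h, if_true]
      simp only [List.take_succ_cons, List.take_zero, List.zip_cons_cons, List.zip_nil_right,
        List.filter_cons, List.filter_nil, List.map_nil]
      by_cases hcond : s ≤ p ∧ p < e
      · simp [hcond]
      · rw [if_neg hcond]
        have hb : (decide (s ≤ p) && decide (p < e)) = false := by
          rcases not_and_or.mp hcond with h1 | h1 <;> simp [h1]
        simp [hb]
    · simp only [h, if_false]
      rw [← ih (p + w)]
      simp only [pvB_seq, List.take_succ_cons, List.zip_cons_cons, List.filter_cons]
      by_cases hcond : s ≤ p ∧ p < e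
      · simp [hcond]
      · rw [if_neg hcond]
        have hb : (decide (s ≤ p) && decide (p < e)) = false := by
          rcases not_and_or.mp hcond with h1 | h1 <;> simp [h1]
        simp [hb]

-- B's slot dictionary: one group
theorem get?_slotG (key : List Int) (g : List Int) (i0 : Nat) (d : PySem.Dict Int (List Int × Nat)) (x : Int) :
    (pvB_slotG key g i0 d).get? x =
      (d.get? x).or (if g.contains x then some (key, i0 + (PySem.List.index? g x).getD 0) else none) := by
  induction g generalizing i0 d with
  | nil => simp [pvB_slotG]
  | cons y g' ih =>
    simp only [pvB_slotG]
    rw [ih]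
    by_cases hxy : x = y
    · subst hxy
      by_cases hd : (d.get? x).isSome
      · obtain ⟨v, hv⟩ := Option.isSome_iff_exists.mp hd
        simp [hd, hv]
      · rw [Option.not_isSome_iff_eq_none] at hd
        rw [PySem.List.index?_cons_self]
        simp [hd, PySem.Dict.get?_insert_self, List.contains_cons]
    · have hyx : y ≠ x := fun h => hxy h.symm
      have hg : (if (d.get? y).isSome then d else d.insert y (key, i0)).get? x = d.get? x := by
        by_cases hd : (d.get? y).isSome
        · simp [hd]
        · simp [hd, PySem.Dict.get?_insert_of_ne d (key, i0) hxy]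
      rw [hg]
      have hcont : (y :: g').contains x = g'.contains x := by
        simp only [List.contains_cons, beq_false_of_ne hxy, Bool.false_or]
      rw [hcont, PySem.List.index?_cons_of_ne g' hyx]
      by_cases hc : g'.contains x = true
      · obtain ⟨m, hm⟩ := Option.isSome_iff_exists.mp
          ((PySem.List.index?_isSome_iff g' x).mpr (by simpa using hc))
        simp only [hc, if_true, hm, Option.map_some, Option.getD_some]
        congr 1
        simp
        omega
      · have hmem : x ∉ g' := by simpa using hc
        simp [hmem]

-- B's slot dictionary: all groups = first hit
theorem get?_slotAll (gs : List (List Int)) (d : PySem.Dict Int (List Int × Nat)) (x : Int) :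
    (pvB_slotAll gs d).get? x = (d.get? x).or (pvFirstHit gs x) := by
  induction gs generalizing d with
  | nil => simp [pvB_slotAll, pvFirstHit]
  | cons g gs' ih =>
    simp only [pvB_slotAll, pvFirstHit]
    rw [ih, get?_slotG, Option.or_assoc]
    by_cases hc : g.contains x = true
    · simp only [if_pos hc, Option.some_or]
      simp
    · simp only [if_neg hc, Option.none_or]

theorem get?_slot (gs : List (List Int)) (x : Int) :
    (pvB_slotAll gs PySem.Dict.empty).get? x = pvFirstHit gs x := by
  rw [get?_slotAll]
  simp [PySem.Dict.get?_empty]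

-- fold-insert over a pair list = last value with that key
theorem get?_foldl_insert {V : Type} (l : List (List Int × V)) (d : PySem.Dict (List Int) V) (x : List Int) :
    (l.foldl (fun d p => d.insert p.1 p.2) d).get? x = (pvLastVal l x).or (d.get? x) := by
  induction l generalizing d with
  | nil => simp [pvLastVal]
  | cons p t ih =>
    obtain ⟨k, v⟩ := p
    simp only [List.foldl_cons, pvLastVal]
    rw [ih]
    by_cases hkx : k = x
    · subst hkx
      simp only [beq_self_eq_true, if_true, PySem.Dict.get?_insert_self]
      cases pvLastVal t k <;> simp
    · have : (k == x) = false := beq_false_of_ne hkx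
      rw [PySem.Dict.get?_insert_of_ne d v (fun h => hkx h.symm)]
      simp [this]

-- zipping against a mapped value list maps the last value
theorem pvLastVal_zip_map {V W : Type} (f : V → W) (ks : List (List Int)) (vs : List V) (x : List Int) :
    pvLastVal (ks.zip (vs.map f)) x = (pvLastVal (ks.zip vs) x).map f := by
  induction ks generalizing vs with
  | nil => simp [pvLastVal]
  | cons k ks' ih =>
    cases vs with
    | nil => simp [pvLastVal]
    | cons v vs' =>
      simp only [List.map_cons, List.zip_cons_cons, pvLastVal, ih]
      cases pvLastVal (ks'.zip vs') x <;> by_cases h : (k == x) = true <;> simp [h]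

-- A's scan in terms of the first hit
theorem pvA_lookup_eq (d : PySem.Dict (List Int) (List (List Int))) (idx : Int) (gs : List (List Int)) :
    pvA_lookup d idx gs =
      (pvFirstHit gs idx).map (fun p => ((d.getD p.1 []).getD p.2 [])) := by
  induction gs with
  | nil => simp [pvA_lookup, pvFirstHit]
  | cons g gs' ih =>
    simp only [pvA_lookup, pvFirstHit]
    by_cases hc : g.contains idx = true
    · simp only [if_pos hc, Option.map_some]
    · simp only [if_neg hc]
      exact ih

-- the memo cache is sound: under the invariant that every cached value is pvB_seq of its
-- key, B's stateful fold produces the same list as the cacheless fold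
theorem pvB_cache_elim (slot : PySem.Dict Int (List Int × Nat))
    (range_row : PySem.Dict (List Int) (List (Int × Int))) (pref widths : List Int)
    (goal : List Int) (cache : PySem.Dict (Int × Int) (List Int)) (acc : List (List Int))
    (hinv : ∀ k v, cache.get? k = some v → v = pvB_seq k.1 k.2 pref widths) :
    (goal.foldl (fun st idx =>
        match slot.get? idx with
        | some (t, i) =>
          let r := (range_row.getD t []).getD i (0, 0)
          let (cache, v) := pvB_seqMemo r.1 r.2 pref widths st.1
          (cache, st.2 ++ [v])
        | none => st) (cache, acc)).2 =
      goal.foldl (fun acc idx =>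
        match slot.get? idx with
        | some (t, i) =>
          let r := (range_row.getD t []).getD i (0, 0)
          acc ++ [pvB_seq r.1 r.2 pref widths]
        | none => acc) acc := by
  induction goal generalizing cache acc with
  | nil => rfl
  | cons idx goal ih =>
    simp only [List.foldl_cons]
    cases hs : slot.get? idx with
    | none => exact ih cache acc hinv
    | some p =>
      obtain ⟨t, i⟩ := p
      simp only
      set r := (range_row.getD t []).getD i (0, 0) with hr
      unfold pvB_seqMemo
      cases hc : cache.get? (r.1, r.2) with
      | some v =>
        have hv : v = pvB_seq r.1 r.2 pref widths := hinv _ _ hc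
        simp only [hv]
        exact ih cache _ hinv
      | none =>
        simp only
        refine (ih _ _ ?_).trans rfl
        intro k v hk
        by_cases hkr : k = (r.1, r.2)
        · subst hkr
          rw [PySem.Dict.get?_insert_self] at hk
          exact (Option.some_inj.mp hk).symm
        · rw [PySem.Dict.get?_insert_of_ne _ _ hkr] at hk
          exact hinv k v hk

-- ===== VERDICT (by name: the statement is the Claim_ definition above) =====
theorem replace_with_room_sequence_spec : Claim_equal_replace_with_room_sequence := by
  intro buildings room_widths grouped_idx goal_idx _hdom hpre
  unfold Spec_replace_with_room_sequence
  simp only [replace_with_room_sequence, replace_with_room_sequence_alt]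
  rw [pvB_cache_elim _ _ _ _ _ _ _ (by intro k v h; rw [PySem.Dict.get?_empty] at h; cases h)]
  apply PySem.List.foldl_congr_mem
  intro acc idx hx
  rw [pvA_lookup_eq, get?_slot]
  have hp := hpre idx hx
  cases hf : pvFirstHit grouped_idx idx with
  | none => rfl
  | some p =>
    obtain ⟨key, i⟩ := p
    rw [hf] at hp
    simp only at hp
    cases hrow : pvLastVal (grouped_idx.zip buildings) key with
    | none => rw [hrow] at hp; simp at hp
    | some row =>
      rw [hrow] at hp
      simp only [decide_eq_true_eq] at hp
      have hA : (((grouped_idx.zip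
            (buildings.map (fun bg => bg.map (fun r => pvA_roomSeq r.1 r.2 room_widths 0)))).foldl
            (fun d p => d.insert p.1 p.2) PySem.Dict.empty).getD key []) =
          row.map (fun r => pvA_roomSeq r.1 r.2 room_widths 0) := by
        unfold PySem.Dict.getD
        rw [get?_foldl_insert, pvLastVal_zip_map, hrow]
        simp [PySem.Dict.get?_empty]
      have hB : (((grouped_idx.zip buildings).foldl (fun d p => d.insert p.1 p.2)
            PySem.Dict.empty).getD key []) = row := by
        unfold PySem.Dict.getD
        rw [get?_foldl_insert, hrow]
        simp [PySem.Dict.get?_empty]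
      simp only [Option.map_some, hA, hB]
      have hget : row[i]? = some row[i] := List.getElem?_eq_getElem hp
      have h1 : (row.map (fun r => pvA_roomSeq r.1 r.2 room_widths 0)).getD i [] =
          pvA_roomSeq row[i].1 row[i].2 room_widths 0 := by
        simp [List.getD, List.getElem?_map, hget]
      have h2 : row.getD i (0, 0) = row[i] := by
        simp [List.getD, hget]
      rw [h1, h2, pvSeq_eq]
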